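-- pv_equiv track=rewrite | github.com/hatopoppoK3/AtCoder-Practice | ABC/146/C.py | function
-- ===== SOURCE A (Python) =====
-- def function(a, b, x, lower, upper):
--     if (lower+1) == upper:
--         return lower
--     ans = (upper+lower)//2
--     score = a*ans+b*len(str(ans))
--     if score <= x:
--         return function(a, b, x, ans, upper)
--     else:
--         return function(a, b, x, lower, ans)
-- ===== SOURCE B (Python) =====
-- def function(a, b, x, lower, upper):
--     # Iterative binary search; maintains the bounds as loop variables.
--     if upper <= lower:
--         raise ValueError("empty search interval: need lower < upper")
--     while lower + 1 < upper:
--         ans = (upper + lower) // 2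
--         score = a * ans + b * len(str(ans))
--         if score <= x:
--             lower = ans
--         else:
--             upper = ans
--     return lower
-- ===== Notes on version B (the rewrite author's own statement) =====
-- stated objective: idiomatic
-- what changed: Replaced the recursive binary search with an iterative while-loop that keeps the two bounds as mutable loop variables and validates the interval up front.
import Mathlib
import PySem

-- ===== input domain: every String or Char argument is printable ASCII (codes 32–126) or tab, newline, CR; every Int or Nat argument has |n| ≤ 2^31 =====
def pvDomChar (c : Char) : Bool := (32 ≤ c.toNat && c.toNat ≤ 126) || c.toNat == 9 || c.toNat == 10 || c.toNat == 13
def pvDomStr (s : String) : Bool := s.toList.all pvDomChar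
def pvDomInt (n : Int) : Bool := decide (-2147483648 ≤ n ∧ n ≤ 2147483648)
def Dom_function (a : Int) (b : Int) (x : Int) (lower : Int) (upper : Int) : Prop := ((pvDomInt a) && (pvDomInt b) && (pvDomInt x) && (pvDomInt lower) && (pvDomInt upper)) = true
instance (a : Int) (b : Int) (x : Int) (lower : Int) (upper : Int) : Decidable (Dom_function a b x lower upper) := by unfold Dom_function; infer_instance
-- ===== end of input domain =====

-- B replaces the recursive binary search with an iterative loop over the two bounds (same cost); A = B whenever lower < upper (elsewhere A raises RecursionError).


-- ===== PORT A =====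
-- A's recursion does not terminate when upper ≤ lower (Python raises RecursionError there),
-- so it is transcribed with a fuel guard; the fuel (upper-lower).toNat + 1 is sufficient on Pre_.
def functionFuel (a : Int) (b : Int) (x : Int) : Nat → Int → Int → Int
  | 0, _, _ => 0
  | fuel + 1, lower, upper =>
    if lower + 1 = upper then lower
    else
      let ans := PySem.Int.floordiv (upper + lower) 2
      let score := a * ans + b * PySem.Str.len (PySem.Int.toStr ans)
      if score ≤ x then functionFuel a b x fuel ans upper
      else functionFuel a b x fuel lower ans

def function (a : Int) (b : Int) (x : Int) (lower : Int) (upper : Int) : Int :=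
  functionFuel a b x ((upper - lower).toNat + 1) lower upper

-- ===== PORT B =====
-- the iterative loop of Source B: while lower + 1 < upper, move one of the two bounds to the midpoint
def functionAltLoop (a : Int) (b : Int) (x : Int) (lower : Int) (upper : Int) : Int :=
  if _h : lower + 1 < upper then
    let ans := PySem.Int.floordiv (upper + lower) 2
    let score := a * ans + b * PySem.Str.len (PySem.Int.toStr ans)
    if score ≤ x then functionAltLoop a b x ans upper
    else functionAltLoop a b x lower ans
  else lower
termination_by (upper - lower).toNat
decreasing_by
  · have hb := PySem.Int.floordiv_two_mid_bounds (lo := lower + 1) (hi := upper - 1) (by omega)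
    rw [show lower + 1 + (upper - 1) = upper + lower from by ring] at hb
    omega
  · have hb := PySem.Int.floordiv_two_mid_bounds (lo := lower + 1) (hi := upper - 1) (by omega)
    rw [show lower + 1 + (upper - 1) = upper + lower from by ring] at hb
    omega

-- Source B raises ValueError when upper ≤ lower (outside Pre_); the port returns 0 there
def function_alt (a : Int) (b : Int) (x : Int) (lower : Int) (upper : Int) : Int :=
  if upper ≤ lower then 0
  else functionAltLoop a b x lower upper

-- ===== PRECONDITION & SPEC =====
-- A terminates exactly when lower < upper; on upper ≤ lower the interval never shrinks and
-- Python raises RecursionError, so those inputs are excluded.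
def Pre_function (_a : Int) (_b : Int) (_x : Int) (lower : Int) (upper : Int) : Prop := lower < upper
instance (a : Int) (b : Int) (x : Int) (lower : Int) (upper : Int) : Decidable (Pre_function a b x lower upper) := by unfold Pre_function; infer_instance
def pvWitness_function : Int × Int × Int × Int × Int := (1, 1, 10, 0, 9)


def Spec_function (a : Int) (b : Int) (x : Int) (lower : Int) (upper : Int) (out : Int) : Prop := out = function_alt a b x lower upper
instance (a : Int) (b : Int) (x : Int) (lower : Int) (upper : Int) (out : Int) : Decidable (Spec_function a b x lower upper out) := by unfold Spec_function; infer_instance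

-- ===== CLAIM (what is proved, stated in full; the proofs are below) =====
def Claim_equal_function : Prop := ∀ (a : Int) (b : Int) (x : Int) (lower : Int) (upper : Int), Dom_function a b x lower upper → Pre_function a b x lower upper → Spec_function a b x lower upper (function a b x lower upper)

-- ===== LEMMAS AND PROOFS =====

-- With enough fuel, A's recursion computes exactly B's loop, for lower < upper.
theorem functionFuel_eq_alt (a b x : Int) :
    ∀ (fuel : Nat) (lower upper : Int), lower < upper → (upper - lower).toNat ≤ fuel →
      functionFuel a b x fuel lower upper = functionAltLoop a b x lower upper := by
  intro fuel
  induction fuel with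
  | zero => intro lower upper hlt hf; omega
  | succ n ih =>
    intro lower upper hlt hf
    rw [functionFuel, functionAltLoop]
    by_cases hbase : lower + 1 = upper
    · simp [hbase]
    · have hlt2 : lower + 1 < upper := by omega
      have hb := PySem.Int.floordiv_two_mid_bounds (lo := lower + 1) (hi := upper - 1) (by omega)
      rw [show lower + 1 + (upper - 1) = upper + lower from by ring] at hb
      simp only [hbase, if_false, dif_pos hlt2]
      set ans := PySem.Int.floordiv (upper + lower) 2 with hans
      split
      · exact ih ans upper (by omega) (by omega)
      · exact ih lower ans (by omega) (by omega)

-- ===== VERDICT (by name: the statement is the Claim_ definition above) =====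
theorem function_spec : Claim_equal_function := by
  intro a b x lower upper _ hpre
  unfold Spec_function function function_alt
  have hlt : lower < upper := hpre
  rw [if_neg (by omega)]
  exact functionFuel_eq_alt a b x _ lower upper hlt (by omega)
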